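-- pv_equiv track=rewrite | github.com/Simon-Stone/advent-of-code | 2015/day-22/day-22.py | no_dupes
-- ===== SOURCE A (Python) =====
-- def no_dupes(strategy):
--     for idx, spell in enumerate(strategy):
--         if spell in ["Shield", "Poison"]:
--             if any(s == spell for s in strategy[idx + 1 : idx + 3]):
--                 return False
--         if spell == "Recharge":
--             if any(s == spell for s in strategy[idx + 1 : idx + 2]):
--                 return False
--     return True
-- ===== SOURCE B (Python) =====
-- def no_dupes(strategy):
--     last_seen = {}
--     for idx, spell in enumerate(strategy):
--         if spell in ("Shield", "Poison", "Recharge"):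
--             prev = last_seen.get(spell)
--             if prev is not None and idx - prev <= (1 if spell == "Recharge" else 2):
--                 return False
--             last_seen[spell] = idx
--     return True
-- ===== Notes on version B (the rewrite author's own statement) =====
-- stated objective: alternative
-- what changed: Replaces the per-index forward window scan (two slices plus any() at every position) with a single pass maintaining a last_seen dict from spell to its most recent index, checking the distance to the previous occurrence instead.
import Mathlib
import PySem

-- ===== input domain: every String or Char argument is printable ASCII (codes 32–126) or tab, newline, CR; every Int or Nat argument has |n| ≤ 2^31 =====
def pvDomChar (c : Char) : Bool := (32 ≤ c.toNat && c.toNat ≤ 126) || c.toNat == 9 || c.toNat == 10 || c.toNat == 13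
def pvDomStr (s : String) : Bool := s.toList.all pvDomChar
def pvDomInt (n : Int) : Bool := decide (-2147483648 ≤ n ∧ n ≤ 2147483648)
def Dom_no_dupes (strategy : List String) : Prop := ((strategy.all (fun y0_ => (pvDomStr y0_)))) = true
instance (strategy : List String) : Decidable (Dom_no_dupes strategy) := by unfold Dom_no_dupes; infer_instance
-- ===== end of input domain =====

-- B replaces A's per-index forward window scan (two slices + any() at every position) with a
-- single pass maintaining a last_seen dict from spell to its most recent index (objective: alternative).

-- ===== PORT A =====
def noDupesGoA (strategy : List String) : List (Int × String) → Bool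
  | [] => true
  | (idx, spell) :: rest =>
    if ["Shield", "Poison"].contains spell
        && (PySem.List.slice strategy (some (idx + 1)) (some (idx + 3))).any (fun s => s == spell) then
      false
    else if spell == "Recharge"
        && (PySem.List.slice strategy (some (idx + 1)) (some (idx + 2))).any (fun s => s == spell) then
      false
    else noDupesGoA strategy rest

def no_dupes (strategy : List String) : Bool :=
  noDupesGoA strategy (PySem.List.enumerate strategy)

-- ===== PORT B =====
def noDupesGoB : List (Int × String) → PySem.Dict String Int → Bool
  | [], _ => true
  | (idx, spell) :: rest, last_seen =>
    if ["Shield", "Poison", "Recharge"].contains spell then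
      -- 'prev = last_seen.get(spell)' followed by 'if prev is not None and idx - prev <= …: return False'
      if (last_seen.get? spell).any
          (fun prev => decide (idx - prev ≤ if spell == "Recharge" then 1 else 2)) then
        false
      else noDupesGoB rest (last_seen.insert spell idx)
    else noDupesGoB rest last_seen

def no_dupes_alt (strategy : List String) : Bool :=
  noDupesGoB (PySem.List.enumerate strategy) PySem.Dict.empty

-- ===== PRECONDITION & SPEC =====
def Spec_no_dupes (strategy : List String) (out : Bool) : Prop := out = no_dupes_alt strategy
instance (strategy : List String) (out : Bool) : Decidable (Spec_no_dupes strategy out) := by unfold Spec_no_dupes; infer_instance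

-- ===== CLAIM (what is proved, stated in full; the proofs are below) =====
def Claim_equal_no_dupes : Prop := ∀ (strategy : List String), Dom_no_dupes strategy → Spec_no_dupes strategy (no_dupes strategy)

-- ===== LEMMAS AND PROOFS =====

/-- "Shield", "Poison" or "Recharge". -/
def relB (s : String) : Bool := s == "Shield" || s == "Poison" || s == "Recharge"

/-- "Shield" or "Poison". -/
def spB (s : String) : Bool := s == "Shield" || s == "Poison"

/-- Forward-looking violation predicate (A's view of a duplicate within the effect window). -/
def violF : List String → Bool
  | [] => false
  | [_] => false
  | a :: b :: rest =>
      (relB a && (b == a)) ||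
      (spB a && (match rest with | c :: _ => c == a | [] => false)) ||
      violF (b :: rest)

/-- Backward-looking violation predicate with the last two elements as context (B's view). -/
def violCtx : Option String → Option String → List String → Bool
  | _, _, [] => false
  | o2, o1, a :: rest =>
      (relB a && ((o1 == some a) || (spB a && (o2 == some a)))) || violCtx o1 (some a) rest

def chkR : Option String → Option String → Bool
  | some x, some b => relB x && (b == x)
  | _, _ => false

def chkS : Option String → Option String → Bool
  | some x, some b => spB x && (b == x)
  | _, _ => false

def hd1 : List String → Option String
  | [] => none
  | a :: _ => some a

def hd2 : List String → Option String
  | _ :: b :: _ => some b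
  | _ => none

lemma spB_rel {a : String} (h : spB a = true) : relB a = true := by
  simp [spB, relB] at *; tauto

lemma bridge : ∀ (l : List String) (o2 o1 : Option String),
    violCtx o2 o1 l = (chkR o1 (hd1 l) || chkS o1 (hd2 l) || chkS o2 (hd1 l) || violF l) := by
  intro l
  induction l with
  | nil => intro o2 o1; simp [violCtx, hd1, hd2, chkR, chkS, violF]
  | cons a tail ih =>
    intro o2 o1
    rw [violCtx, ih]
    have h1 : hd1 (a :: tail) = some a := rfl
    have h2 : hd2 (a :: tail) = hd1 tail := by cases tail <;> rfl
    rw [h1, h2]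
    have hvf : violF (a :: tail) =
        ((chkR (some a) (hd1 tail) || chkS (some a) (hd2 tail)) || violF tail) := by
      cases tail with
      | nil => simp [violF, chkR, chkS, hd1, hd2]
      | cons b rest =>
        cases rest with
        | nil => simp [violF, chkR, chkS, hd1, hd2]
        | cons c r => simp [violF, chkR, chkS, hd1, hd2]
    rw [hvf]
    have hR : (relB a && (o1 == some a)) = chkR o1 (some a) := by
      cases o1 with
      | none => simp [chkR]
      | some x =>
        by_cases hx : x = a
        · subst hx; simp [chkR]
        · have e1 : (x == a) = false := by simp [hx]
          have e2 : (a == x) = false := by simp [Ne.symm hx]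
          simp [chkR, e1, e2]
    have hS : (relB a && (spB a && (o2 == some a))) = chkS o2 (some a) := by
      cases o2 with
      | none => simp [chkS]
      | some y =>
        by_cases hy : y = a
        · subst hy
          simp [chkS]
          intro h; exact spB_rel h
        · have e1 : (y == a) = false := by simp [hy]
          have e2 : (a == y) = false := by simp [Ne.symm hy]
          simp [chkS, e1, e2]
    rw [Bool.and_or_distrib_left, hR, hS]
    cases chkR o1 (some a) <;> cases chkS o2 (some a) <;> cases chkR (some a) (hd1 tail) <;>
      cases chkS (some a) (hd2 tail) <;> cases chkS o1 (hd1 tail) <;> cases violF tail <;> simp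

lemma A_char : ∀ (suffix : List String) (k : Nat) (strategy : List String),
    strategy.drop k = suffix →
    noDupesGoA strategy (PySem.List.enumerate suffix (k : Int)) = !violF suffix := by
  intro suffix
  induction suffix with
  | nil => intro k strategy h; simp [PySem.List.enumerate_nil, noDupesGoA, violF]
  | cons a tail ih =>
    intro k strategy h
    have hdrop : strategy.drop (k + 1) = tail := by
      have h2 : List.drop 1 (List.drop k strategy) = List.drop (k + 1) strategy :=
        List.drop_drop
      rw [← h2, h]
      rfl
    have e1 : ((k : Int) + 1) = ((k + 1 : Nat) : Int) := by push_cast; ring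
    have e3 : ((k : Int) + 3) = ((k + 3 : Nat) : Int) := by push_cast; ring
    have e2 : ((k : Int) + 2) = ((k + 2 : Nat) : Int) := by push_cast; ring
    have hs3 : PySem.List.slice strategy (some ((k : Int) + 1)) (some ((k : Int) + 3))
        = tail.take 2 := by
      rw [e1, e3, PySem.List.slice_natCast, hdrop, show k + 3 - (k + 1) = 2 from by omega]
    have hs2 : PySem.List.slice strategy (some ((k : Int) + 1)) (some ((k : Int) + 2))
        = tail.take 1 := by
      rw [e1, e2, PySem.List.slice_natCast, hdrop, show k + 2 - (k + 1) = 1 from by omega]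
    rw [PySem.List.enumerate_cons, noDupesGoA, hs3, hs2]
    have ih' := ih (k + 1) strategy hdrop
    rw [e1, ih']
    clear ih h hdrop hs3 hs2 e1 e2 e3
    cases tail with
    | nil => simp [violF]
    | cons b rest =>
      cases rest with
      | nil =>
        by_cases hS : a = "Shield" <;> by_cases hP : a = "Poison" <;>
          by_cases hR : a = "Recharge" <;> by_cases hb : b = a <;>
          simp_all [violF, relB, spB]
      | cons c r =>
        by_cases hS : a = "Shield" <;> by_cases hP : a = "Poison" <;>
          by_cases hR : a = "Recharge" <;> by_cases hb : b = a <;> by_cases hc : c = a <;>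
          simp_all [violF, relB, spB]

/-- Invariant relating B's dict to the last two elements processed (k = current index). -/
def INV (d : PySem.Dict String Int) (k : Nat) (o2 o1 : Option String) : Prop :=
  ∀ s : String, relB s = true →
    (o1 = some s → d.get? s = some ((k : Int) - 1)) ∧
    (o1 ≠ some s → o2 = some s → d.get? s = some ((k : Int) - 2)) ∧
    (o1 ≠ some s → o2 ≠ some s → ∀ p : Int, d.get? s = some p → p ≤ (k : Int) - 3)

lemma contains_relB (a : String) : (["Shield", "Poison", "Recharge"].contains a) = relB a := by
  by_cases h1 : a = "Shield" <;> by_cases h2 : a = "Poison" <;> by_cases h3 : a = "Recharge" <;>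
    simp [relB, h1, h2, h3]

lemma spB_of_ne (a : String) (h : relB a = true) (hne : a ≠ "Recharge") : spB a = true := by
  simp [relB, spB] at *; tauto

lemma INV_insert (a : String) (d : PySem.Dict String Int) (k : Nat) (o2 o1 : Option String)
    (hinv : INV d k o2 o1) : INV (d.insert a (k : Int)) (k + 1) o1 (some a) := by
  intro s hs
  obtain ⟨c1, c2, c3⟩ := hinv s hs
  by_cases hsa : s = a
  · subst hsa
    refine ⟨?_, ?_, ?_⟩
    · intro _
      rw [PySem.Dict.get?_insert_self]
      congr 1
      push_cast
      ring
    · intro hne; exact absurd rfl hne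
    · intro hne; exact absurd rfl hne
  · have hget : (d.insert a (k : Int)).get? s = d.get? s := by
      rw [PySem.Dict.get?_insert]
      simp [hsa]
    refine ⟨?_, ?_, ?_⟩
    · intro h
      exact absurd (Option.some_injective _ h).symm hsa
    · intro _ ho1
      rw [hget, c1 ho1]
      congr 1
      push_cast
      ring
    · intro _ hne2 p hp
      rw [hget] at hp
      by_cases ho2 : o2 = some s
      · have := c2 hne2 ho2
        rw [this] at hp
        have : p = (k : Int) - 2 := (Option.some_injective _ hp).symm
        push_cast
        omega
      · have := c3 hne2 ho2 p hp
        push_cast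
        omega

lemma INV_skip (a : String) (d : PySem.Dict String Int) (k : Nat) (o2 o1 : Option String)
    (hrel : relB a = false) (hinv : INV d k o2 o1) : INV d (k + 1) o1 (some a) := by
  intro s hs
  obtain ⟨c1, c2, c3⟩ := hinv s hs
  refine ⟨?_, ?_, ?_⟩
  · intro h
    have : a = s := Option.some_injective _ h
    rw [this, hs] at hrel
    exact absurd hrel (by simp)
  · intro _ ho1
    rw [c1 ho1]
    congr 1
    push_cast
    ring
  · intro _ hne2 p hp
    by_cases ho2 : o2 = some s
    · have := c2 hne2 ho2
      rw [this] at hp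
      have : p = (k : Int) - 2 := (Option.some_injective _ hp).symm
      push_cast
      omega
    · have := c3 hne2 ho2 p hp
      push_cast
      omega

lemma B_char : ∀ (suffix : List String) (k : Nat) (d : PySem.Dict String Int) (o2 o1 : Option String),
    INV d k o2 o1 →
    noDupesGoB (PySem.List.enumerate suffix (k : Int)) d = !violCtx o2 o1 suffix := by
  intro suffix
  induction suffix with
  | nil => intro k d o2 o1 _; simp [PySem.List.enumerate_nil, noDupesGoB, violCtx]
  | cons a tail ih =>
    intro k d o2 o1 hinv
    rw [PySem.List.enumerate_cons, noDupesGoB, contains_relB, violCtx]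
    have e1 : ((k : Int) + 1) = ((k + 1 : Nat) : Int) := by push_cast; ring
    by_cases hrel : relB a = true
    · obtain ⟨c1, c2, c3⟩ := hinv a hrel
      rw [hrel]
      simp only [if_true]
      by_cases ho1 : o1 = some a
      · have hget := c1 ho1
        rw [hget]
        have hcond : ((k : Int) - ((k : Int) - 1) ≤ if (a == "Recharge") then 1 else 2) := by
          split_ifs <;> omega
        simp only [Option.any_some, decide_eq_true_eq, if_pos hcond]
        simp [ho1]
      · by_cases ho2 : o2 = some a
        · have hget := c2 ho1 ho2
          rw [hget]
          by_cases hrch : a = "Recharge"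
          · have hcond : ¬((k : Int) - ((k : Int) - 2) ≤ if (a == "Recharge") then 1 else 2) := by
              rw [if_pos (by simp [hrch])]
              omega
            have hsp : spB a = false := by rw [hrch]; decide
            simp only [Option.any_some, decide_eq_true_eq, if_neg hcond, e1,
              ih (k + 1) (d.insert a (k : Int)) o1 (some a) (INV_insert a d k o2 o1 hinv)]
            simp [ho1, hsp]
          · have hcond : ((k : Int) - ((k : Int) - 2) ≤ if (a == "Recharge") then 1 else 2) := by
              rw [if_neg (by simp [hrch])]
              omega
            have hsp := spB_of_ne a hrel hrch
            simp only [Option.any_some, decide_eq_true_eq, if_pos hcond]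
            simp [ho2, hsp]
        · cases hget : d.get? a with
          | some prev =>
            have hp := c3 ho1 ho2 prev hget
            have hcond : ¬((k : Int) - prev ≤ if (a == "Recharge") then 1 else 2) := by
              split_ifs <;> omega
            simp only [Option.any_some, decide_eq_true_eq, if_neg hcond, e1,
              ih (k + 1) (d.insert a (k : Int)) o1 (some a) (INV_insert a d k o2 o1 hinv)]
            simp [ho1, ho2]
          | none =>
            simp only [Option.any_none, Bool.false_eq_true, if_false, e1,
              ih (k + 1) (d.insert a (k : Int)) o1 (some a) (INV_insert a d k o2 o1 hinv)]
            simp [ho1, ho2]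
    · have hrel' : relB a = false := by simpa using hrel
      rw [hrel']
      simp only [Bool.false_and, Bool.false_or]
      rw [e1, ih (k + 1) d o1 (some a) (INV_skip a d k o2 o1 hrel' hinv)]
      simp

-- ===== VERDICT (by name: the statement is the Claim_ definition above) =====
theorem no_dupes_spec : Claim_equal_no_dupes := by
  intro strategy _
  unfold Spec_no_dupes no_dupes no_dupes_alt
  have hA := A_char strategy 0 strategy (by simp)
  have hB := B_char strategy 0 PySem.Dict.empty none none (by
    intro s _
    refine ⟨by simp, by simp, ?_⟩
    intro _ _ p hp
    simp [PySem.Dict.get?_empty] at hp)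
  simp only [Nat.cast_zero] at hA hB
  rw [hA, hB, bridge]
  simp [chkR, chkS]
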